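-- pv_equiv track=rewrite | github.com/pypi-data/pypi-mirror-350 | packages/umiche/umiche-0.1.5-py3-none-any.whl/umiche/deduplicate/method/MarkovClustering.py | get_full_subcc
-- ===== SOURCE A (Python) =====
-- from typing import Dict
--
-- def get_full_subcc(
--
--         ccs_dict : Dict,
--         mcl_ccs_dict : Dict,
-- ) -> Dict:
--     d = {}
--     for ccid2, cc in ccs_dict.items():
--         d[ccid2] = []
--         for i in cc:
--             for ccid1, mcl_cc in mcl_ccs_dict.items():
--                 if i in mcl_cc:
--                     d[ccid2] = d[ccid2] + mcl_cc
--     return d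
-- ===== SOURCE B (Python) =====
-- def get_full_subcc(ccs_dict, mcl_ccs_dict):
--     # inverted index: element -> list of mcl components containing it (in mcl dict order)
--     index = {}
--     for mcl_cc in mcl_ccs_dict.values():
--         for i in dict.fromkeys(mcl_cc):
--             index.setdefault(i, []).append(mcl_cc)
--     out = {}
--     for ccid, cc in ccs_dict.items():
--         out[ccid] = [x for i in cc for g in index.get(i, []) for x in g]
--     return out
-- ===== Notes on version B (the rewrite author's own statement) =====
-- stated objective: faster
-- what changed: B precomputes an inverted index element -> list of mcl components containing it, replacing A's inner scan over all mcl components (with an 'in' membership test on each) for every element of every cc.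
import Mathlib
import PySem

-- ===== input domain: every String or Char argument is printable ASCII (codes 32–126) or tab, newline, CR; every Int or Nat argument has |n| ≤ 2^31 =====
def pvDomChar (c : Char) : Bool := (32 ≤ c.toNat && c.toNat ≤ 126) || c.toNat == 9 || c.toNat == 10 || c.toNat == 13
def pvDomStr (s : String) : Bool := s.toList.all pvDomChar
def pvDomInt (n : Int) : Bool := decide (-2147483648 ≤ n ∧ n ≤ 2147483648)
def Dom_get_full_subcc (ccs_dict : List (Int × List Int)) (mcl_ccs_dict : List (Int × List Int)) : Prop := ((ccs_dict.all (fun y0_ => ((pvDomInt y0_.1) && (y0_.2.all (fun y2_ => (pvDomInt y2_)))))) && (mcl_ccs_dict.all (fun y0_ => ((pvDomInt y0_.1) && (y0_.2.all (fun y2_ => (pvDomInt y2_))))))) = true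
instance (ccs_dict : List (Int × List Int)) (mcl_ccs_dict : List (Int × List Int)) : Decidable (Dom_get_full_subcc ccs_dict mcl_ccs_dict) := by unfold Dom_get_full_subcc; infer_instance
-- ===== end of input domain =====

-- B replaces A's inner scan over all mcl components per element by a precomputed
-- inverted index element -> containing mcl components (objective: faster).

-- ===== PORT A =====
-- literal transliteration of A: for each (ccid2, cc), start d[ccid2] = [], then for
-- each i in cc scan every (ccid1, mcl_cc) and append mcl_cc when i ∈ mcl_cc.
def get_full_subcc (ccs_dict : List (Int × List Int)) (mcl_ccs_dict : List (Int × List Int)) : List (Int × List Int) :=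
  let ccsD := PySem.Dict.ofList ccs_dict
  let mclD := PySem.Dict.ofList mcl_ccs_dict
  (ccsD.items.foldl (fun d p =>
      p.2.foldl (fun d i =>
          mclD.items.foldl (fun d q =>
              if i ∈ q.2 then d.insert p.1 (d.getD p.1 [] ++ q.2) else d) d)
        (d.insert p.1 [])) PySem.Dict.empty).items

-- ===== PORT B =====
-- literal transliteration of B: build the inverted index (dict.fromkeys = PySem.List.dedup,
-- setdefault/append = Dict.modify with default []), then one lookup per element.
def get_full_subcc_alt (ccs_dict : List (Int × List Int)) (mcl_ccs_dict : List (Int × List Int)) : List (Int × List Int) :=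
  let mclD := PySem.Dict.ofList mcl_ccs_dict
  let idx := mclD.items.foldl (fun d q =>
      (PySem.List.dedup q.2).foldl (fun d i => d.modify i [] (fun g => g ++ [q.2])) d)
    (PySem.Dict.empty)
  let ccsD := PySem.Dict.ofList ccs_dict
  (ccsD.items.foldl (fun out p =>
      out.insert p.1 (p.2.flatMap (fun i => (idx.getD i []).flatMap (fun g => g))))
    PySem.Dict.empty).items

-- ===== PRECONDITION & SPEC =====
def Spec_get_full_subcc (ccs_dict : List (Int × List Int)) (mcl_ccs_dict : List (Int × List Int)) (out : List (Int × List Int)) : Prop := out = get_full_subcc_alt ccs_dict mcl_ccs_dict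
instance (ccs_dict : List (Int × List Int)) (mcl_ccs_dict : List (Int × List Int)) (out : List (Int × List Int)) : Decidable (Spec_get_full_subcc ccs_dict mcl_ccs_dict out) := by unfold Spec_get_full_subcc; infer_instance

-- ===== CLAIM (what is proved, stated in full; the proofs are below) =====
def Claim_equal_get_full_subcc : Prop := ∀ (ccs_dict : List (Int × List Int)) (mcl_ccs_dict : List (Int × List Int)), Dom_get_full_subcc ccs_dict mcl_ccs_dict → Spec_get_full_subcc ccs_dict mcl_ccs_dict (get_full_subcc ccs_dict mcl_ccs_dict)

-- ===== LEMMAS AND PROOFS =====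

-- the value A accumulates for one element i, as a pure list fold
def pvScan (mcl : List (Int × List Int)) (i : Int) (acc : List Int) : List Int :=
  mcl.foldl (fun acc q => if i ∈ q.2 then acc ++ q.2 else acc) acc

-- the index B builds
def pvIdx (mcl : List (Int × List Int)) : PySem.Dict Int (List (List Int)) :=
  mcl.foldl (fun d q =>
      (PySem.List.dedup q.2).foldl (fun d i => d.modify i [] (fun g => g ++ [q.2])) d)
    PySem.Dict.empty

-- bucket of c is untouched by the inner loop when c ∉ js
theorem pv_inner_untouched (c : Int) (v : List Int) :
    ∀ (js : List Int) (d : PySem.Dict Int (List (List Int))), c ∉ js →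
      ((js.foldl (fun d i => d.modify i [] (fun g => g ++ [v])) d).getD c []) = d.getD c [] := by
  intro js
  induction js with
  | nil => intro d _; rfl
  | cons j js ih =>
    intro d h
    simp only [List.foldl_cons]
    rw [ih _ (by simp_all), PySem.Dict.getD_modify_of_ne]
    intro he; exact h (by simp [he])

-- inner index loop over a Nodup list appends [v] to the bucket of c iff c is in it
theorem pv_inner_bucket (c : Int) (v : List Int) :
    ∀ (js : List Int) (d : PySem.Dict Int (List (List Int))), js.Nodup →
      ((js.foldl (fun d i => d.modify i [] (fun g => g ++ [v])) d).getD c []) =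
        d.getD c [] ++ (if c ∈ js then [v] else []) := by
  intro js
  induction js with
  | nil => intro d _; simp
  | cons j js ih =>
    intro d hnd
    simp only [List.foldl_cons]
    by_cases hc : c = j
    · subst hc
      have hcj : c ∉ js := (List.nodup_cons.mp hnd).1
      rw [pv_inner_untouched c v js _ hcj, PySem.Dict.getD_modify_self]
      simp
    · rw [ih _ (List.nodup_cons.mp hnd).2, PySem.Dict.getD_modify_of_ne _ _ _ (by omega : c ≠ j)]
      simp only [List.mem_cons]
      have : (c ∈ js ∨ c = j) ↔ c ∈ js := by tauto
      simp [hc]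

-- characterisation of B's index bucket
theorem pv_bucket (c : Int) :
    ∀ (mcl : List (Int × List Int)),
      (pvIdx mcl).getD c [] = mcl.flatMap (fun q => if c ∈ q.2 then [q.2] else []) := by
  have gen : ∀ (mcl : List (Int × List Int)) (d : PySem.Dict Int (List (List Int))),
      ((mcl.foldl (fun d q =>
          (PySem.List.dedup q.2).foldl (fun d i => d.modify i [] (fun g => g ++ [q.2])) d) d).getD c []) =
        d.getD c [] ++ mcl.flatMap (fun q => if c ∈ q.2 then [q.2] else []) := by
    intro mcl
    induction mcl with
    | nil => intro d; simp
    | cons q mcl ih =>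
      intro d
      simp only [List.foldl_cons, List.flatMap_cons]
      rw [ih, pv_inner_bucket c q.2 _ _ (PySem.List.nodup_dedup q.2)]
      simp
  intro mcl
  have := gen mcl PySem.Dict.empty
  simpa [pvIdx] using this

-- A's scan for one element equals acc ++ flattened bucket
theorem pv_scan_eq (i : Int) :
    ∀ (mcl : List (Int × List Int)) (acc : List Int),
      pvScan mcl i acc = acc ++ ((pvIdx mcl).getD i []).flatMap (fun g => g) := by
  intro mcl acc
  rw [pv_bucket i mcl]
  induction mcl generalizing acc with
  | nil => simp [pvScan]
  | cons q mcl ih =>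
    simp only [pvScan, List.foldl_cons, List.flatMap_cons] at *
    by_cases h : i ∈ q.2 <;> simp [h, ih, List.append_assoc]

-- B's per-key value
def pvValB (mcl : List (Int × List Int)) (cc : List Int) : List Int :=
  cc.flatMap (fun i => ((pvIdx mcl).getD i []).flatMap (fun g => g))

-- A's per-element-of-a-cc loop, collapsed: it only ever rewrites key k
theorem pv_row_collapse (mcl : List (Int × List Int)) (k : Int) (i : Int) :
    ∀ (d : PySem.Dict Int (List Int)) (v : List Int),
      (mcl.foldl (fun d q =>
          if i ∈ q.2 then d.insert k (d.getD k [] ++ q.2) else d) (d.insert k v)) =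
        d.insert k (pvScan mcl i v) := by
  induction mcl with
  | nil => intro d v; simp [pvScan]
  | cons q mcl ih =>
    intro d v
    simp only [List.foldl_cons, pvScan] at *
    by_cases h : i ∈ q.2
    · simp only [h, if_pos]
      rw [PySem.Dict.getD_insert_self, PySem.Dict.insert_insert_self, ih]
    · simp [h, ih d v]

-- A's whole per-key loop equals a single insert of the scanned value
theorem pv_cc_collapse (mcl : List (Int × List Int)) (k : Int) :
    ∀ (cc : List Int) (d : PySem.Dict Int (List Int)) (v : List Int),
      (cc.foldl (fun d i =>
          mcl.foldl (fun d q =>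
              if i ∈ q.2 then d.insert k (d.getD k [] ++ q.2) else d) d) (d.insert k v)) =
        d.insert k (cc.foldl (fun acc i => pvScan mcl i acc) v) := by
  intro cc
  induction cc with
  | nil => intro d v; simp
  | cons i cc ih =>
    intro d v
    simp only [List.foldl_cons]
    rw [pv_row_collapse mcl k i d v, ih]

-- folding A's scans over cc gives B's flatMap value
theorem pv_fold_scan (mcl : List (Int × List Int)) :
    ∀ (cc : List Int) (v : List Int),
      cc.foldl (fun acc i => pvScan mcl i acc) v = v ++ pvValB mcl cc := by
  intro cc
  induction cc with
  | nil => intro v; simp [pvValB]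
  | cons i cc ih =>
    intro v
    simp only [List.foldl_cons, pvValB, List.flatMap_cons] at *
    rw [pv_scan_eq i mcl v, ih, List.append_assoc]

-- A's outer dict build over fresh distinct keys appends one entry per key
theorem pv_outer (mcl : List (Int × List Int)) :
    ∀ (entries : List (Int × List Int)) (d : PySem.Dict Int (List Int)),
      (entries.map (·.1)).Nodup → (∀ p ∈ entries, d.contains p.1 = false) →
      (entries.foldl (fun d p =>
          p.2.foldl (fun d i =>
              mcl.foldl (fun d q =>
                  if i ∈ q.2 then d.insert p.1 (d.getD p.1 [] ++ q.2) else d) d)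
            (d.insert p.1 [])) d).items =
        d.items ++ entries.map (fun p => (p.1, pvValB mcl p.2)) := by
  intro entries
  induction entries with
  | nil => intro d _ _; simp
  | cons p entries ih =>
    intro d hnd hfresh
    have hnd' : (p.1 :: entries.map (·.1)).Nodup := by simpa using hnd
    simp only [List.foldl_cons, List.map_cons]
    rw [pv_cc_collapse mcl p.1 p.2 d [], pv_fold_scan mcl p.2 []]
    rw [ih _ ((List.nodup_cons.mp hnd').2)
        (by
          intro r hr
          rw [PySem.Dict.contains_insert]
          have h1 : r.1 ≠ p.1 := by
            have := (List.nodup_cons.mp hnd').1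
            intro he; exact this (by rw [← he]; exact List.mem_map_of_mem hr)
          have h2 := hfresh r (List.mem_cons_of_mem _ hr)
          simp [h1, h2])]
    rw [PySem.Dict.items_insert_of_not_contains _ _ (hfresh p (List.mem_cons_self ..))]
    simp [pvValB]

-- ===== VERDICT (by name: the statement is the Claim_ definition above) =====
theorem get_full_subcc_spec : Claim_equal_get_full_subcc := by
  intro ccs mcl _
  unfold Spec_get_full_subcc get_full_subcc get_full_subcc_alt
  rw [pv_outer (PySem.Dict.ofList mcl).items (PySem.Dict.ofList ccs).items PySem.Dict.empty
      (by simpa [PySem.Dict.keys] using PySem.Dict.nodup_keys_ofList ccs)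
      (by intro p _; exact PySem.Dict.contains_empty p.1)]
  rw [PySem.Dict.items_foldl_insert_fresh _ _ _ _
      (by intro p _; exact PySem.Dict.contains_empty p.1)
      (by simpa [PySem.Dict.keys] using PySem.Dict.nodup_keys_ofList ccs)]
  simp [pvValB, pvIdx]
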